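-- pv_equiv track=rewrite | github.com/marimari00/LOL_Draft_Analyzer | validation/run_mass_simulation.py | _split_chunk_sizes
-- ===== SOURCE A (Python) =====
-- from typing import Any, Dict, List, Tuple, Optional
--
-- def _split_chunk_sizes(total: int, workers: int) -> List[int]:
--     if workers <= 1 or total <= 0:
--         return [max(total, 0)]
--     base = total // workers
--     remainder = total % workers
--     sizes = []
--     for i in range(workers):
--         part = base + (1 if i < remainder else 0)
--         if part > 0:
--             sizes.append(part)
--     return sizes
-- ===== SOURCE B (Python) =====
-- def _split_chunk_sizes(total: int, workers: int):
--     if workers <= 1 or total <= 0: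
--         return [max(total, 0)]
--     # Greedy: hand each worker the ceiling share of what is left, then
--     # split the rest among the remaining workers; stop when nothing is left.
--     sizes = []
--     remaining = total
--     left = workers
--     while left > 0 and remaining > 0:
--         chunk = -(-remaining // left)
--         sizes.append(chunk)
--         remaining -= chunk
--         left -= 1
--     return sizes
-- ===== Notes on version B (the rewrite author's own statement) =====
-- stated objective: alternative
-- what changed: Replaces the divmod-and-count construction (base = total//workers, remainder chunks of base+1, then base chunks) with a greedy loop that repeatedly hands the next worker the ceiling share ceil(remaining/workers_left) of what is left and stops when nothing remains; no base/remainder pair is ever computed.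
import Mathlib
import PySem

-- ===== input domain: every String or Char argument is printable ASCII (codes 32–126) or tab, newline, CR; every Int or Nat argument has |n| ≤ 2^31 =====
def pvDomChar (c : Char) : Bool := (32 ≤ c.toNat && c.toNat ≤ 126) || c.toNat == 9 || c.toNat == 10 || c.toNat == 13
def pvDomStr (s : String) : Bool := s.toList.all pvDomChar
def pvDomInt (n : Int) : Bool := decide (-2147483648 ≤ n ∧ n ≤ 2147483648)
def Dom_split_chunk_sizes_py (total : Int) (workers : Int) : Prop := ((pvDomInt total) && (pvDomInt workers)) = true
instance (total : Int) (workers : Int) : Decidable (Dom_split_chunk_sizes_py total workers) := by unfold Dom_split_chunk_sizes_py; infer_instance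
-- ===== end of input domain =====

-- B replaces A's divmod-and-count loop with a greedy recursion peeling the ceiling share of the rest; objective: alternative (same cost, different algorithm).


-- ===== PORT A =====
def split_chunk_sizes_py (total : Int) (workers : Int) : List Int :=
  if workers ≤ 1 ∨ total ≤ 0 then [max total 0]
  else
    let base := PySem.Int.floordiv total workers
    let remainder := PySem.Int.mod total workers
    (PySem.List.pyRange 0 workers 1).foldl
      (fun sizes i =>
        let part := base + (if i < remainder then 1 else 0)
        if part > 0 then sizes ++ [part] else sizes) []

-- ===== PORT B =====
-- The while loop of B: each worker takes the ceiling share of what is left.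
def pvPeel (remaining : Int) (left : Int) (sizes : List Int) : List Int :=
  if _h : left > 0 ∧ remaining > 0 then
    let chunk := -(PySem.Int.floordiv (-remaining) left)   -- Python: -(-remaining // left), ceiling division
    pvPeel (remaining - chunk) (left - 1) (sizes ++ [chunk])
  else sizes
termination_by left.toNat
decreasing_by omega

def split_chunk_sizes_py_alt (total : Int) (workers : Int) : List Int :=
  if workers ≤ 1 ∨ total ≤ 0 then [max total 0]
  else pvPeel total workers []

-- ===== PRECONDITION & SPEC =====
def Spec_split_chunk_sizes_py (total : Int) (workers : Int) (out : List Int) : Prop := out = split_chunk_sizes_py_alt total workers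
instance (total : Int) (workers : Int) (out : List Int) : Decidable (Spec_split_chunk_sizes_py total workers out) := by unfold Spec_split_chunk_sizes_py; infer_instance

-- ===== CLAIM (what is proved, stated in full; the proofs are below) =====
def Claim_equal_split_chunk_sizes_py : Prop := ∀ (total : Int) (workers : Int), Dom_split_chunk_sizes_py total workers → Spec_split_chunk_sizes_py total workers (split_chunk_sizes_py total workers)

-- ===== LEMMAS AND PROOFS =====

-- Closed form of A's loop: the first min(r,n) iterations append b+1, the rest append b only when b > 0.
lemma fold_closed (b r : Int) (hb : 0 ≤ b) (hr : 0 ≤ r) (n : Nat) :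
    (PySem.List.pyRange 0 (n : Int) 1).foldl
      (fun sizes i =>
        if (b + (if i < r then 1 else 0)) > 0 then
          sizes ++ [b + (if i < r then 1 else 0)] else sizes) []
    = List.replicate (min r.toNat n) (b + 1) ++
      (if b > 0 then List.replicate (n - min r.toNat n) b else []) := by
  induction n with
  | zero => simp
  | succ n ih =>
    have hstep : PySem.List.pyRange 0 ((n : Int) + 1) 1
        = PySem.List.pyRange 0 (n : Int) 1 ++ [(n : Int)] :=
      PySem.List.pyRange_one_succ_right (by exact_mod_cast Int.natCast_nonneg n)
    have hcast : ((n + 1 : Nat) : Int) = (n : Int) + 1 := by push_cast; ring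
    rw [hcast, hstep, List.foldl_append, ih]
    simp only [List.foldl]
    by_cases hlt : (n : Int) < r
    · have hmin1 : min r.toNat (n + 1) = n + 1 := by omega
      have hmin0 : min r.toNat n = n := by omega
      have hpos : 0 < b + 1 := by omega
      rw [hmin0, hmin1]
      simp only [if_pos hlt, if_pos hpos]
      by_cases hbpos : b > 0 <;>
        simp [hbpos, List.replicate_succ' (n := n)]
    · have hmin : min r.toNat (n + 1) = min r.toNat n := by omega
      have hminle : min r.toNat n ≤ n := by omega
      rw [hmin]
      simp only [if_neg hlt, add_zero]
      by_cases hbpos : b > 0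
      · have : n + 1 - min r.toNat n = (n - min r.toNat n) + 1 := by omega
        simp [hbpos, this, List.replicate_succ' (n := n - min r.toNat n)]
      · simp [hbpos]

-- Closed form of B's loop, for remaining = b*w + r with 0 ≤ b, 0 ≤ r < w.
lemma peel_closed (w : Nat) : ∀ (remaining b r : Int) (sizes : List Int), 0 ≤ b → 0 ≤ r → r < (w : Int) →
    remaining = b * (w : Int) + r →
    pvPeel remaining (w : Int) sizes
      = sizes ++ List.replicate r.toNat (b + 1) ++
        (if b > 0 then List.replicate (w - r.toNat) b else []) := by
  induction w with
  | zero => intro remaining b r sizes hb hr hrw _; omega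
  | succ n ih =>
    intro remaining b r sizes hb hr hrw htot
    rw [pvPeel]
    by_cases hrun : ((n + 1 : Nat) : Int) > 0 ∧ remaining > 0
    · rw [dif_pos hrun]
      have hchunk : -(PySem.Int.floordiv (-remaining) ((n + 1 : Nat) : Int))
          = b + (if 0 < r then 1 else 0) := by
        rw [PySem.Int.neg_floordiv_neg_eq_iff_of_pos (by exact_mod_cast Nat.succ_pos n)]
        split_ifs with hif <;> constructor <;> nlinarith [hrun.2]
      by_cases hr0 : 0 < r
      · -- this worker takes b+1; remainder drops by one
        rw [hchunk]; simp only [if_pos hr0]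
        have hrec : remaining - (b + 1) = b * ((n : Nat) : Int) + (r - 1) := by
          push_cast at htot ⊢; linarith
        have hcast : ((n + 1 : Nat) : Int) - 1 = ((n : Nat) : Int) := by push_cast; ring
        rw [hcast, ih (remaining - (b + 1)) b (r - 1) (sizes ++ [b + 1]) hb (by omega)
              (by push_cast at hrw ⊢; omega) hrec]
        have h1 : r.toNat = (r - 1).toNat + 1 := by omega
        have h3 : n + 1 - ((r - 1).toNat + 1) = n - (r - 1).toNat := by omega
        rw [h1, h3, List.replicate_succ]
        simp [List.append_assoc]
      · -- r = 0 here, so remaining > 0 forces b > 0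
        have hr00 : r = 0 := by omega
        rw [if_neg hr0, add_zero] at hchunk
        subst hr00
        have hbpos : b > 0 := by nlinarith [hrun.2]
        rw [hchunk]
        simp only [Int.toNat_zero, List.replicate_zero, List.append_nil, if_pos hbpos]
        rcases Nat.eq_zero_or_pos n with hn | hn
        · subst hn
          rw [pvPeel]
          have h0 : remaining - b = 0 := by push_cast at htot; omega
          have hstop : ¬(((1 : Nat) : Int) - 1 > 0 ∧ remaining - b > 0) := by omega
          rw [dif_neg hstop]
          simp
        · have hrec : remaining - b = b * ((n : Nat) : Int) + 0 := by
            push_cast at htot ⊢; linarith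
          have hcast : ((n + 1 : Nat) : Int) - 1 = ((n : Nat) : Int) := by push_cast; ring
          rw [hcast, ih (remaining - b) b 0 (sizes ++ [b]) hb le_rfl (by exact_mod_cast hn) hrec]
          simp only [Int.toNat_zero, List.replicate_zero, List.append_nil, if_pos hbpos]
          have h4 : n + 1 - 0 = (n - 0) + 1 := by omega
          rw [h4, List.replicate_succ]
          simp [List.append_assoc]
    · have hb0 : b = 0 ∧ r = 0 := by
        have : ¬ remaining > 0 := by
          intro hrm; exact hrun ⟨by positivity, hrm⟩
        constructor <;> nlinarith
      rw [dif_neg hrun]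
      simp [hb0.1, hb0.2]

-- ===== VERDICT (by name: the statement is the Claim_ definition above) =====
theorem split_chunk_sizes_py_spec : Claim_equal_split_chunk_sizes_py := by
  intro total workers _
  unfold Spec_split_chunk_sizes_py split_chunk_sizes_py split_chunk_sizes_py_alt
  by_cases hg : workers ≤ 1 ∨ total ≤ 0
  · simp [hg]
  · simp only [if_neg hg]
    rw [not_or, not_le, not_le] at hg
    obtain ⟨hw, ht⟩ := hg
    have hwpos : 0 < workers := by omega
    set b := PySem.Int.floordiv total workers with hbdef
    set r := PySem.Int.mod total workers with hrdef
    have hb : 0 ≤ b := by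
      rw [hbdef, PySem.Int.floordiv_eq_ediv_of_pos hwpos]
      exact Int.ediv_nonneg (by omega) (by omega)
    have hr0 : 0 ≤ r := PySem.Int.mod_nonneg _ hwpos
    have hrlt : r < workers := PySem.Int.mod_lt _ hwpos
    have htot : total = b * workers + r := by
      have := PySem.Int.floordiv_mul_add_mod total workers
      rw [← hbdef, ← hrdef] at this; linarith
    have hwn : workers = ((workers.toNat : Nat) : Int) := by omega
    rw [hwn] at hrlt htot ⊢
    rw [fold_closed _ _ hb hr0, peel_closed workers.toNat total b r [] hb hr0 hrlt htot]
    have hmin : min r.toNat workers.toNat = r.toNat := by omega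
    rw [hmin, List.nil_append]
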